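-- pv_equiv track=rewrite | github.com/SJTU-xihe/multi-player-game-ai-project | agents/ai_bots/search_ai.py | _calculate_clustering_penalty
-- ===== SOURCE A (Python) =====
-- def _calculate_clustering_penalty(boxes, targets):
--     """计算聚集惩罚"""
--     penalty = 0
--     incomplete_boxes = [box for box in boxes if box not in targets]
--
--     for i, box1 in enumerate(incomplete_boxes):
--         for box2 in incomplete_boxes[i+1:]:
--             distance = abs(box1[0] - box2[0]) + abs(box1[1] - box2[1])
--             if distance == 1:  # 相邻的箱子
--                 penalty += 50
--             elif distance == 2:  # 很近的箱子
--                 penalty += 20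
--
--     return penalty
-- ===== SOURCE B (Python) =====
-- def _calculate_clustering_penalty(boxes, targets):
--     """Counter + fixed-offset probing: O(n) instead of O(n^2) over pairs."""
--     target_set = set(targets)
--     counts = {}
--     for box in boxes:
--         if box not in target_set:
--             counts[box] = counts.get(box, 0) + 1
--     offsets = ((1, 0, 50), (0, 1, 50), (2, 0, 20), (0, 2, 20), (1, 1, 20), (1, -1, 20))
--     penalty = 0
--     for (x, y), c in counts.items():
--         for dx, dy, w in offsets:
--             penalty += w * c * counts.get((x + dx, y + dy), 0)
--     return penalty
-- ===== Notes on version B (the rewrite author's own statement) =====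
-- stated objective: faster
-- what changed: Replaced the all-pairs double loop over incomplete boxes by a position counter built in one pass, probing only the six fixed distance-1/2 half-offsets per distinct position.
import Mathlib
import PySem

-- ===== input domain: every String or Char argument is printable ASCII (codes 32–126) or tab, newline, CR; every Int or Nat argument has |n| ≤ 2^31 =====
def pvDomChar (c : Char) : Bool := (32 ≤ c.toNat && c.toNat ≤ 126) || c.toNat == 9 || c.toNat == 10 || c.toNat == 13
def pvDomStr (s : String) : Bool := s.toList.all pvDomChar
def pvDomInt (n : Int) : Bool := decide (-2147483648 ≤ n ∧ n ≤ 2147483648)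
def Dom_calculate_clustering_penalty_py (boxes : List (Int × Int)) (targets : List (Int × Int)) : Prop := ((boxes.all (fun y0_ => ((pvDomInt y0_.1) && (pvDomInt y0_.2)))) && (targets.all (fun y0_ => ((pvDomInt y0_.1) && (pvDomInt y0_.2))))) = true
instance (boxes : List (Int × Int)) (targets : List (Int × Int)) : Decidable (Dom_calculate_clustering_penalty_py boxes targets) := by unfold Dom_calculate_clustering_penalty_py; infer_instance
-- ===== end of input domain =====

-- B replaces A's all-pairs double loop by a one-pass position counter probed at six fixed offsets (measured faster).

-- ===== PORT A =====
def calculate_clustering_penalty_py (boxes : List (Int × Int)) (targets : List (Int × Int)) : Int :=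
  let incomplete := boxes.filter (fun box => !(targets.contains box))
  (PySem.List.enumerate incomplete 0).foldl
    (fun penalty ib =>
      (PySem.List.slice incomplete (some (ib.1 + 1)) none).foldl
        (fun penalty box2 =>
          let distance := |ib.2.1 - box2.1| + |ib.2.2 - box2.2|
          if distance = 1 then penalty + 50
          else if distance = 2 then penalty + 20
          else penalty)
        penalty)
    0

-- ===== PORT B =====
-- the tuple 'offsets' from Source B
def pvOffsets : List (Int × Int × Int) := [(1, 0, 50), (0, 1, 50), (2, 0, 20), (0, 2, 20), (1, 1, 20), (1, -1, 20)]

def calculate_clustering_penalty_py_alt (boxes : List (Int × Int)) (targets : List (Int × Int)) : Int :=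
  let target_set : PySem.Set (Int × Int) := PySem.Set.ofList targets
  let counts : PySem.Dict (Int × Int) Int :=
    boxes.foldl (fun d box =>
      if PySem.Set.contains target_set box then d
      else d.insert box (d.getD box 0 + 1)) PySem.Dict.empty
  counts.items.foldl (fun penalty pc =>
    pvOffsets.foldl (fun penalty o =>
      penalty + o.2.2 * pc.2 * counts.getD (pc.1.1 + o.1, pc.1.2 + o.2.1) 0) penalty) 0

-- ===== PRECONDITION & SPEC =====
def Spec_calculate_clustering_penalty_py (boxes : List (Int × Int)) (targets : List (Int × Int)) (out : Int) : Prop := out = calculate_clustering_penalty_py_alt boxes targets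
instance (boxes : List (Int × Int)) (targets : List (Int × Int)) (out : Int) : Decidable (Spec_calculate_clustering_penalty_py boxes targets out) := by unfold Spec_calculate_clustering_penalty_py; infer_instance

-- ===== CLAIM (what is proved, stated in full; the proofs are below) =====
def Claim_equal_calculate_clustering_penalty_py : Prop := ∀ (boxes : List (Int × Int)) (targets : List (Int × Int)), Dom_calculate_clustering_penalty_py boxes targets → Spec_calculate_clustering_penalty_py boxes targets (calculate_clustering_penalty_py boxes targets)

-- ===== LEMMAS AND PROOFS =====

-- the weight A adds for an (earlier, later) pair of incomplete boxes
def pvF (p q : Int × Int) : Int :=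
  if |p.1 - q.1| + |p.2 - q.2| = 1 then 50
  else if |p.1 - q.1| + |p.2 - q.2| = 2 then 20 else 0

-- the directed half-weight B charges to the ordered pair (p, q): the pvOffsets indicator sum
def pvH (p q : Int × Int) : Int :=
  (pvOffsets.map (fun o => if q = (p.1 + o.1, p.2 + o.2.1) then o.2.2 else 0)).sum

-- A's value over the incomplete list, structurally
def pvPairSum : List (Int × Int) → Int
  | [] => 0
  | x :: xs => (xs.map (pvF x)).sum + pvPairSum xs

set_option maxHeartbeats 800000 in
lemma pvH_zero_of_big (p q : Int × Int) (h : 3 ≤ |q.1 - p.1| ∨ 3 ≤ |q.2 - p.2|) : pvH p q = 0 := by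
  rcases p with ⟨a, b⟩; rcases q with ⟨c, d⟩
  simp only at h
  simp only [pvH, pvOffsets, List.map, List.sum_cons, List.sum_nil, Prod.mk.injEq]
  rcases abs_cases (c - a) with ⟨h1, _⟩ | ⟨h1, _⟩ <;>
    rcases abs_cases (d - b) with ⟨h2, _⟩ | ⟨h2, _⟩ <;>
      split_ifs <;> omega

lemma pvH_translate (t p q : Int × Int) :
    pvH (p.1 + t.1, p.2 + t.2) (q.1 + t.1, q.2 + t.2) = pvH p q := by
  unfold pvH
  apply congrArg
  apply List.map_congr_left
  intro o _
  have hiff : ((q.1 + t.1, q.2 + t.2) = ((p.1 + t.1) + o.1, (p.2 + t.2) + o.2.1))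
      ↔ (q = (p.1 + o.1, p.2 + o.2.1)) := by
    rw [Prod.ext_iff, Prod.ext_iff]; simp only; omega
  rw [if_congr hiff rfl rfl]

lemma pvF_translate (t p q : Int × Int) :
    pvF (p.1 + t.1, p.2 + t.2) (q.1 + t.1, q.2 + t.2) = pvF p q := by
  simp [pvF, add_sub_add_right_eq_sub]

set_option maxHeartbeats 800000 in
lemma pvFH_origin (u v : Int) : pvF (0, 0) (u, v) = pvH (0, 0) (u, v) + pvH (u, v) (0, 0) := by
  by_cases hu : -2 ≤ u ∧ u ≤ 2
  · by_cases hv : -2 ≤ v ∧ v ≤ 2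
    · obtain ⟨hu1, hu2⟩ := hu; obtain ⟨hv1, hv2⟩ := hv
      interval_cases u <;> interval_cases v <;> decide
    · have h1 : pvH (0, 0) (u, v) = 0 := by
        apply pvH_zero_of_big; right; simp only [sub_zero]
        rcases abs_cases v with ⟨h2, _⟩ | ⟨h2, _⟩ <;> omega
      have h2 : pvH (u, v) (0, 0) = 0 := by
        apply pvH_zero_of_big; right; simp only [zero_sub, abs_neg]
        rcases abs_cases v with ⟨h3, _⟩ | ⟨h3, _⟩ <;> omega
      have h3 : pvF (0, 0) (u, v) = 0 := by
        simp only [pvF, zero_sub, abs_neg]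
        have := abs_nonneg u
        rcases abs_cases v with ⟨g2, _⟩ | ⟨g2, _⟩ <;> split_ifs <;> omega
      rw [h1, h2, h3]; ring
  · have h1 : pvH (0, 0) (u, v) = 0 := by
      apply pvH_zero_of_big; left; simp only [sub_zero]
      rcases abs_cases u with ⟨h2, _⟩ | ⟨h2, _⟩ <;> omega
    have h2 : pvH (u, v) (0, 0) = 0 := by
      apply pvH_zero_of_big; left; simp only [zero_sub, abs_neg]
      rcases abs_cases u with ⟨h3, _⟩ | ⟨h3, _⟩ <;> omega
    have h3 : pvF (0, 0) (u, v) = 0 := by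
      simp only [pvF, zero_sub, abs_neg]
      have := abs_nonneg v
      rcases abs_cases u with ⟨g2, _⟩ | ⟨g2, _⟩ <;> split_ifs <;> omega
    rw [h1, h2, h3]; ring

lemma pvF_eq_pvH (p q : Int × Int) : pvF p q = pvH p q + pvH q p := by
  have t1 := pvH_translate p (0, 0) (q.1 - p.1, q.2 - p.2)
  have t2 := pvH_translate p (q.1 - p.1, q.2 - p.2) (0, 0)
  have t3 := pvF_translate p (0, 0) (q.1 - p.1, q.2 - p.2)
  simp only [zero_add, sub_add_cancel, Prod.mk.eta] at t1 t2 t3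
  rw [t3, t1, t2]
  exact pvFH_origin _ _

lemma pvH_self (p : Int × Int) : pvH p p = 0 := by
  have t := pvH_translate p (0, 0) (0, 0)
  simp only [zero_add, Prod.mk.eta] at t
  rw [t]; decide

-- Σ over the list of a weighted indicator is weight × count
lemma pvSum_if_const (c : Int × Int) (w : Int) :
    ∀ l : List (Int × Int), (l.map (fun q => if q = c then w else 0)).sum = w * (l.count c : Int) := by
  intro l
  induction l with
  | nil => simp
  | cons x xs ih =>
    simp only [List.map, List.sum_cons, ih, List.count_cons, beq_iff_eq]
    split_ifs with h <;> push_cast <;> ring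

-- exchange a sum over the list with a sum over the offsets
lemma pvSum_swap {α β : Type} (f : β → α → Int) :
    ∀ (os : List β) (l : List α),
      (l.map (fun q => (os.map (fun o => f o q)).sum)).sum
        = (os.map (fun o => (l.map (f o)).sum)).sum := by
  intro os
  induction os with
  | nil => intro l; simp
  | cons o os ih =>
    intro l
    simp only [List.map, List.sum_cons, PySem.List.sum_map_add_int, ih]

-- a row of pvH summed over the list equals B's six probed counts
lemma pvRowSum (p : Int × Int) (l : List (Int × Int)) :
    (l.map (pvH p)).sum =
      (pvOffsets.map (fun o => o.2.2 * (l.count (p.1 + o.1, p.2 + o.2.1) : Int))).sum := by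
  have e : l.map (pvH p)
      = l.map (fun q => (pvOffsets.map
          (fun o => if q = (p.1 + o.1, p.2 + o.2.1) then o.2.2 else 0)).sum) := rfl
  rw [e]
  refine (pvSum_swap (fun o q => if q = (p.1 + o.1, p.2 + o.2.1) then o.2.2 else 0)
    pvOffsets l).trans ?_
  apply congrArg
  apply List.map_congr_left
  intro o _
  exact pvSum_if_const _ _ l

lemma pvSum_if_key (x : Int × Int) (t : (Int × Int) → Int) :
    ∀ keys : List (Int × Int), keys.Nodup → x ∈ keys →
      (keys.map (fun p => if x = p then t p else 0)).sum = t x := by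
  intro keys
  induction keys with
  | nil => simp
  | cons k ks ih =>
    intro hnd hx
    simp only [List.map, List.sum_cons]
    rcases List.mem_cons.mp hx with h | h
    · subst h
      have hz : (ks.map (fun p => if x = p then t p else 0)).sum = 0 := by
        apply List.sum_eq_zero
        intro y hy
        rcases List.mem_map.mp hy with ⟨p, hp, rfl⟩
        have : x ≠ p := fun e => (List.nodup_cons.mp hnd).1 (e ▸ hp)
        simp [this]
      simp [hz]
    · have hne : x ≠ k := fun e => (List.nodup_cons.mp hnd).1 (e ▸ h)
      simp [hne, ih (List.nodup_cons.mp hnd).2 h]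

-- summing g over l = summing count·g over a nodup list of keys covering l
lemma pvSum_count (g : (Int × Int) → Int) (keys : List (Int × Int)) (hnd : keys.Nodup) :
    ∀ l : List (Int × Int), (∀ b ∈ l, b ∈ keys) →
      (keys.map (fun p => (l.count p : Int) * g p)).sum = (l.map g).sum := by
  intro l
  induction l with
  | nil => simp
  | cons x xs ih =>
    intro hmem
    have hx : x ∈ keys := hmem x (List.mem_cons_self ..)
    have hxs : ∀ b ∈ xs, b ∈ keys := fun b hb => hmem b (List.mem_cons_of_mem _ hb)
    have expand : (keys.map (fun p => (((x :: xs).count p : Nat) : Int) * g p)).sum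
        = (keys.map (fun p => ((xs.count p : Nat) : Int) * g p)).sum
          + (keys.map (fun p => if x = p then g p else 0)).sum := by
      rw [← PySem.List.sum_map_add_int]
      apply congrArg
      apply List.map_congr_left
      intro p _
      simp only [List.count_cons, beq_iff_eq]
      split_ifs with h <;> push_cast <;> ring
    rw [expand, ih hxs, pvSum_if_key x g keys hnd hx]
    simp [add_comm]

-- A's pair sum equals the full double sum of pvH
lemma pvPairSum_eq_double : ∀ l : List (Int × Int),
    pvPairSum l = (l.map (fun a => (l.map (pvH a)).sum)).sum := by
  intro l
  induction l with
  | nil => simp [pvPairSum]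
  | cons x xs ih =>
    simp only [pvPairSum, List.map, List.sum_cons, pvH_self, zero_add]
    have lhs : (xs.map (pvF x)).sum
        = (xs.map (fun b => pvH x b)).sum + (xs.map (fun b => pvH b x)).sum := by
      rw [← PySem.List.sum_map_add_int]
      exact congrArg _ (List.map_congr_left fun b _ => pvF_eq_pvH x b)
    have rhs : (xs.map (fun a => pvH a x + (xs.map (fun b => pvH a b)).sum)).sum
        = (xs.map (fun a => pvH a x)).sum + (xs.map (fun a => (xs.map (fun b => pvH a b)).sum)).sum :=
      PySem.List.sum_map_add_int ..
    rw [lhs, rhs, ← ih]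
    ring

-- 'for box in boxes: if cond: skip else step' is a fold over the filtered list
lemma pvFoldl_skip {α β : Type} (p : α → Bool) (f : β → α → β) :
    ∀ (l : List α) (d : β),
      l.foldl (fun d x => if p x then d else f d x) d = (l.filter (fun x => !p x)).foldl f d := by
  intro l
  induction l with
  | nil => intro d; rfl
  | cons x xs ih =>
    intro d
    by_cases h : p x <;> simp [h, ih]

lemma pvContains (targets : List (Int × Int)) (b : Int × Int) :
    PySem.Set.contains (PySem.Set.ofList targets) b = targets.contains b := by
  by_cases h : b ∈ targets <;>
    simp [PySem.Set.contains_eq_listContains, PySem.Set.mem_ofList, h]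

-- A's loop: enumerate + tail slice computes pvPairSum
lemma pvA_loop (full : List (Int × Int)) :
    ∀ (suf : List (Int × Int)) (k : Nat) (a : Int), full.drop k = suf →
      (PySem.List.enumerate suf (k : Int)).foldl
        (fun penalty ib =>
          (PySem.List.slice full (some (ib.1 + 1)) none).foldl
            (fun penalty box2 =>
              let distance := |ib.2.1 - box2.1| + |ib.2.2 - box2.2|
              if distance = 1 then penalty + 50
              else if distance = 2 then penalty + 20
              else penalty)
            penalty)
        a = a + pvPairSum suf := by
  intro suf
  induction suf with
  | nil => intro k a h; simp [PySem.List.enumerate, pvPairSum]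
  | cons x xs ih =>
    intro k a h
    have hdrop : full.drop (k + 1) = xs := by
      rw [← List.tail_drop, h]; rfl
    rw [PySem.List.enumerate_cons]
    simp only [List.foldl_cons]
    have hcast : ((k : Int) + 1) = ((k + 1 : Nat) : Int) := by push_cast; ring
    rw [hcast, PySem.List.slice_from_natCast, hdrop]
    have inner : ∀ (a : Int),
        xs.foldl (fun penalty box2 =>
          let distance := |x.1 - box2.1| + |x.2 - box2.2|
          if distance = 1 then penalty + 50
          else if distance = 2 then penalty + 20
          else penalty) a = a + (xs.map (pvF x)).sum := by
      intro a
      rw [PySem.List.foldl_congr_mem _ _ (fun acc b2 => acc + pvF x b2) _ ?_, PySem.List.foldl_add]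
      intro acc b2 _
      simp only [pvF]
      split_ifs <;> ring
    rw [inner, ih (k + 1) _ hdrop, pvPairSum]
    ring

-- ===== VERDICT (by name: the statement is the Claim_ definition above) =====
theorem calculate_clustering_penalty_py_spec : Claim_equal_calculate_clustering_penalty_py := by
  intro boxes targets _
  unfold Spec_calculate_clustering_penalty_py
  unfold calculate_clustering_penalty_py calculate_clustering_penalty_py_alt
  simp only
  set l := boxes.filter (fun box => !(targets.contains box)) with hl
  -- B's one-pass counter is the counter of the incomplete list
  have hfilter : boxes.filter (fun b => !(PySem.Set.contains (PySem.Set.ofList targets) b)) = l := by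
    rw [hl]
    exact List.filter_congr fun b _ => by rw [pvContains]
  have hcounts : boxes.foldl (fun d box =>
      if PySem.Set.contains (PySem.Set.ofList targets) box then d
      else d.insert box (d.getD box 0 + 1)) PySem.Dict.empty = PySem.Dict.counter l := by
    rw [pvFoldl_skip, hfilter, PySem.Dict.foldl_insert_getD_add_one_eq_counter]
  rw [hcounts]
  -- A's side
  have hA := pvA_loop l l 0 0 rfl
  simp only [Nat.cast_zero, zero_add] at hA
  rw [hA]
  -- B's side: flatten the two folds into sums
  have hstep : ∀ (pen : Int), ∀ pc ∈ (PySem.Dict.counter l).items,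
      pvOffsets.foldl (fun penalty o =>
        penalty + o.2.2 * pc.2 * (PySem.Dict.counter l).getD (pc.1.1 + o.1, pc.1.2 + o.2.1) 0) pen
      = pen + (pvOffsets.map (fun o =>
          o.2.2 * pc.2 * (PySem.Dict.counter l).getD (pc.1.1 + o.1, pc.1.2 + o.2.1) 0)).sum := by
    intro pen pc _
    exact PySem.List.foldl_add ..
  rw [PySem.List.foldl_congr_mem _ _
    (fun pen pc => pen + (pvOffsets.map (fun o =>
      o.2.2 * pc.2 * (PySem.Dict.counter l).getD (pc.1.1 + o.1, pc.1.2 + o.2.1) 0)).sum) _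
    (fun pen pc hpc => hstep pen pc hpc), PySem.List.foldl_add, zero_add]
  rw [PySem.Dict.items_counter, List.map_map]
  -- pointwise: each distinct key contributes count · (row sum of pvH)
  have hkey : ∀ kk : Int × Int,
      (pvOffsets.map (fun o =>
        o.2.2 * ((l.count kk : Nat) : Int) * (PySem.Dict.counter l).getD (kk.1 + o.1, kk.2 + o.2.1) 0)).sum
      = ((l.count kk : Nat) : Int) * (l.map (pvH kk)).sum := by
    intro kk
    rw [pvRowSum]
    simp only [PySem.Dict.getD_counter, pvOffsets, List.map, List.sum_cons, List.sum_nil]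
    ring
  have hmapeq : (PySem.Set.ofList l).map
        ((fun pc : (Int × Int) × Int => (pvOffsets.map (fun o =>
          o.2.2 * pc.2 * (PySem.Dict.counter l).getD (pc.1.1 + o.1, pc.1.2 + o.2.1) 0)).sum)
         ∘ fun k => (k, ((l.count k : Nat) : Int)))
      = (PySem.Set.ofList l).map (fun k => ((l.count k : Nat) : Int) * (l.map (pvH k)).sum) :=
    List.map_congr_left fun k _ => hkey k
  rw [hmapeq, pvSum_count _ (PySem.Set.ofList l) (PySem.Set.nodup_ofList l) l
    (fun b hb => (PySem.Set.mem_ofList l b).mpr hb), ← pvPairSum_eq_double]
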